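-- pv_equiv track=rewrite | github.com/kurusnsn/deterministic-ml-engine | gateway-service/gateway_modules/concepts/concept_grounding.py | _prioritize_king_adjacent
-- ===== SOURCE A (Python) =====
-- from typing import List, Tuple, Dict, Optional, Set
--
-- KING_SAFETY_SQUARES_WHITE = {"f2", "g2", "h2", "f1", "g1", "h1", "a2", "b2", "c2", "a1", "b1", "c1"}
--
-- KING_SAFETY_SQUARES_BLACK = {"f7", "g7", "h7", "f8", "g8", "h8", "a7", "b7", "c7", "a8", "b8", "c8"}
--
-- def _prioritize_king_adjacent(
--
--     statements: List[str],
--     preferred_color: Optional[str],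
-- ) -> List[str]:
--     """
--     Prioritize statements mentioning squares adjacent to the king.
--
--     Args:
--         statements: List of evidence statements
--         preferred_color: "white" or "black" to determine which king
--
--     Returns:
--         Reordered list with king-adjacent mentions first
--     """
--     if not preferred_color:
--         return statements
--
--     # Determine relevant squares based on opponent's king
--     # If concept is about white's king safety, we care about squares near white's king
--     if preferred_color == "white":
--         relevant_squares = KING_SAFETY_SQUARES_WHITE
--     else:
--         relevant_squares = KING_SAFETY_SQUARES_BLACK
--
--     king_adjacent = []
--     other = []
--
--     for stmt in statements:
--         stmt_lower = stmt.lower()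
--         is_king_adjacent = False
--
--         # Check for king-adjacent squares
--         for sq in relevant_squares:
--             if sq in stmt_lower:
--                 is_king_adjacent = True
--                 break
--
--         # Also prioritize "king on" mentions
--         if "king on" in stmt_lower or "protects the king" in stmt_lower:
--             is_king_adjacent = True
--
--         if is_king_adjacent:
--             king_adjacent.append(stmt)
--         else:
--             other.append(stmt)
--
--     return king_adjacent + other
-- ===== SOURCE B (Python) =====
-- from typing import List, Optional
--
-- KING_SAFETY_SQUARES_WHITE = {"f2", "g2", "h2", "f1", "g1", "h1", "a2", "b2", "c2", "a1", "b1", "c1"}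
-- KING_SAFETY_SQUARES_BLACK = {"f7", "g7", "h7", "f8", "g8", "h8", "a7", "b7", "c7", "a8", "b8", "c8"}
--
--
-- def _prioritize_king_adjacent(
--     statements: List[str],
--     preferred_color: Optional[str],
-- ) -> List[str]:
--     if not preferred_color:
--         return statements
--
--     squares = (
--         KING_SAFETY_SQUARES_WHITE
--         if preferred_color == "white"
--         else KING_SAFETY_SQUARES_BLACK
--     )
--
--     def is_king_adjacent(stmt: str) -> bool:
--         t = stmt.lower()
--         return (
--             any(sq in t for sq in squares)
--             or "king on" in t
--             or "protects the king" in t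
--         )
--
--     # One stable sort on a binary key: king-adjacent first, original order kept.
--     return sorted(statements, key=lambda s: 0 if is_king_adjacent(s) else 1)
-- ===== Notes on version B (the rewrite author's own statement) =====
-- stated objective: idiomatic
-- what changed: Replaced the two-accumulator partition loop (with an inner break loop over the square set) by a single predicate that lowercases each statement once plus one stable sort on a binary key, relying on sort stability to keep original order within each group.
import Mathlib
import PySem

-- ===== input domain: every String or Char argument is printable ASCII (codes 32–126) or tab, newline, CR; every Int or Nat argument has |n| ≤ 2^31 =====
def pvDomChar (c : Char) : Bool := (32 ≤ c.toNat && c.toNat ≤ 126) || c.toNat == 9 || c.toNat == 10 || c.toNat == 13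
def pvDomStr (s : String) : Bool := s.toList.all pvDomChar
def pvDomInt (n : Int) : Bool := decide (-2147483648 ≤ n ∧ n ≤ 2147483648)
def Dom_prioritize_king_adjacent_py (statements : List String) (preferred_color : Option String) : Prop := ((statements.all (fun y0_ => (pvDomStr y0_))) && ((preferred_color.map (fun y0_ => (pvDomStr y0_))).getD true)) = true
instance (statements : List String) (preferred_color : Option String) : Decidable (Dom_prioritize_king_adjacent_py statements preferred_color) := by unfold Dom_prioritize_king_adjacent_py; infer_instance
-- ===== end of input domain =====

-- B replaces A's two-accumulator partition loop by a predicate plus one stable sort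
-- on a binary key (idiomatic; same observable result, no speed claim).

-- ===== PORT A =====
-- KING_SAFETY_SQUARES_WHITE / _BLACK: the loop over the set only computes an
-- order-independent boolean (any square a substring), so a fixed-order list is exact.
def kingSquaresWhite : List String :=
  ["f2", "g2", "h2", "f1", "g1", "h1", "a2", "b2", "c2", "a1", "b1", "c1"]

def kingSquaresBlack : List String :=
  ["f7", "g7", "h7", "f8", "g8", "h8", "a7", "b7", "c7", "a8", "b8", "c8"]

def prioritize_king_adjacent_py (statements : List String) (preferred_color : Option String) : List String :=
  match preferred_color with
  | none => statements
  | some pc =>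
    if pc = "" then statements                         -- `not preferred_color` is also true for ""
    else
      let relevant_squares := if pc = "white" then kingSquaresWhite else kingSquaresBlack
      let acc := statements.foldl (fun (acc : List String × List String) stmt =>
        let stmt_lower := PySem.Str.lower stmt
        -- inner for-loop with break: first-hit boolean over the squares
        let is_king_adjacent := relevant_squares.any (fun sq => PySem.Str.isIn sq stmt_lower)
        let is_king_adjacent :=
          if PySem.Str.isIn "king on" stmt_lower || PySem.Str.isIn "protects the king" stmt_lower
          then true else is_king_adjacent
        if is_king_adjacent then (acc.1 ++ [stmt], acc.2) else (acc.1, acc.2 ++ [stmt]))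
        ([], [])
      acc.1 ++ acc.2

-- ===== PORT B =====
def pkaIsKingAdjacent (squares : List String) (stmt : String) : Bool :=
  let t := PySem.Str.lower stmt
  squares.any (fun sq => PySem.Str.isIn sq t)
    || PySem.Str.isIn "king on" t || PySem.Str.isIn "protects the king" t

def prioritize_king_adjacent_py_alt (statements : List String) (preferred_color : Option String) : List String :=
  match preferred_color with
  | none => statements
  | some pc =>
    if pc = "" then statements
    else
      let squares := if pc = "white" then kingSquaresWhite else kingSquaresBlack
      PySem.List.sorted statements
        (fun s => if pkaIsKingAdjacent squares s then (0 : Int) else 1) false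

-- ===== PRECONDITION & SPEC =====
def Spec_prioritize_king_adjacent_py (statements : List String) (preferred_color : Option String) (out : List String) : Prop := out = prioritize_king_adjacent_py_alt statements preferred_color
instance (statements : List String) (preferred_color : Option String) (out : List String) : Decidable (Spec_prioritize_king_adjacent_py statements preferred_color out) := by unfold Spec_prioritize_king_adjacent_py; infer_instance

-- ===== CLAIM (what is proved, stated in full; the proofs are below) =====
def Claim_equal_prioritize_king_adjacent_py : Prop := ∀ (statements : List String) (preferred_color : Option String), Dom_prioritize_king_adjacent_py statements preferred_color → Spec_prioritize_king_adjacent_py statements preferred_color (prioritize_king_adjacent_py statements preferred_color)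

-- ===== LEMMAS AND PROOFS =====

-- A's partition loop appends each statement to one of the two accumulators.
theorem pka_foldl_partition (p : String → Bool) (xs ka ot : List String) :
    xs.foldl (fun (acc : List String × List String) stmt =>
        if p stmt then (acc.1 ++ [stmt], acc.2) else (acc.1, acc.2 ++ [stmt])) (ka, ot)
      = (ka ++ xs.filter p, ot ++ xs.filter (fun s => !p s)) := by
  induction xs generalizing ka ot with
  | nil => simp
  | cons x xs ih =>
    by_cases hx : p x <;> simp [List.foldl_cons, hx, ih]

-- Inserting into a 0/1-keyed split list: a key-0 element lands at the end of the
-- 0-block, a key-1 element at the very end (stability of the insertion sort).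
theorem pka_insertBy_split (p : String → Bool) (x : String) (A B : List String)
    (hA : ∀ a ∈ A, p a = true) (hB : ∀ b ∈ B, p b = false) :
    PySem.List.insertBy
        (fun a b => decide ((if p a then (0 : Int) else 1) < (if p b then (0 : Int) else 1)))
        x (A ++ B)
      = if p x then A ++ x :: B else A ++ B ++ [x] := by
  induction A with
  | nil =>
    induction B with
    | nil => by_cases hx : p x <;> simp [PySem.List.insertBy, hx]
    | cons b bs ihb =>
      have hb := hB b (by simp)
      have hbs : ∀ y ∈ bs, p y = false := fun y hy => hB y (by simp [hy])
      by_cases hx : p x <;>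
        simp_all [PySem.List.insertBy]
  | cons a as iha =>
    have ha := hA a (by simp)
    have has : ∀ y ∈ as, p y = true := fun y hy => hA y (by simp [hy])
    by_cases hx : p x <;>
      simp_all [PySem.List.insertBy]

-- Stable sort on the binary key 0/1 is exactly 'filter p ++ filter (!p)'.
theorem pka_sorted_binary (p : String → Bool) (xs : List String) :
    PySem.List.sorted xs (fun s => if p s then (0 : Int) else 1) false
      = xs.filter p ++ xs.filter (fun s => !p s) := by
  rw [PySem.List.sorted_eq_foldl_insertBy]
  suffices h : ∀ (ys : List String) (A B : List String)
      (_ : ∀ a ∈ A, p a = true) (_ : ∀ b ∈ B, p b = false),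
      ys.foldl (fun acc x => PySem.List.insertBy
          (fun a b => decide ((if p a then (0 : Int) else 1) < (if p b then (0 : Int) else 1)))
          x acc) (A ++ B)
        = (A ++ ys.filter p) ++ (B ++ ys.filter (fun s => !p s)) by
    simpa using h xs [] [] (by simp) (by simp)
  intro ys
  induction ys with
  | nil => intro A B _ _; simp
  | cons y ys ih =>
    intro A B hA hB
    rw [List.foldl_cons, pka_insertBy_split p y A B hA hB]
    by_cases hy : p y
    · have hA' : ∀ a ∈ A ++ [y], p a = true := by
        intro a ha; rcases List.mem_append.1 ha with h | h
        · exact hA a h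
        · simp at h; simpa [h] using hy
      have := ih (A ++ [y]) B hA' hB
      simp only [hy, if_true]
      rw [show A ++ y :: B = (A ++ [y]) ++ B by simp, this]
      simp [hy]
    · have hB' : ∀ b ∈ B ++ [y], p b = false := by
        intro b hb; rcases List.mem_append.1 hb with h | h
        · exact hB b h
        · simp at h; simpa [h] using hy
      have := ih A (B ++ [y]) hA hB'
      rw [if_neg hy, List.append_assoc A B [y], this]
      simp [hy]

theorem pka_main (p : String → Bool) (xs : List String) :
    (xs.foldl (fun (acc : List String × List String) stmt =>
        if p stmt then (acc.1 ++ [stmt], acc.2) else (acc.1, acc.2 ++ [stmt])) ([], [])).1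
      ++ (xs.foldl (fun (acc : List String × List String) stmt =>
        if p stmt then (acc.1 ++ [stmt], acc.2) else (acc.1, acc.2 ++ [stmt])) ([], [])).2
      = PySem.List.sorted xs (fun s => if p s then (0 : Int) else 1) false := by
  rw [pka_foldl_partition p xs [] [], pka_sorted_binary p xs]; simp

-- 'if (k1 or k2) then True else a' is 'a or k1 or k2'.
theorem pka_if_bool {α : Type} (a k1 k2 : Bool) (X Y : α) :
    (if (if k1 || k2 then true else a) then X else Y) = (if a || k1 || k2 then X else Y) := by
  cases a <;> cases k1 <;> cases k2 <;> rfl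

-- ===== VERDICT (by name: the statement is the Claim_ definition above) =====
theorem prioritize_king_adjacent_py_spec : Claim_equal_prioritize_king_adjacent_py := by
  intro statements pc _
  unfold Spec_prioritize_king_adjacent_py prioritize_king_adjacent_py prioritize_king_adjacent_py_alt
  match pc with
  | none => rfl
  | some s =>
    by_cases hs : s = ""
    · simp [hs]
    · simp only [hs, if_false]
      generalize (if s = "white" then kingSquaresWhite else kingSquaresBlack) = sq
      have hfun : (fun (acc : List String × List String) stmt =>
            let stmt_lower := PySem.Str.lower stmt
            let is_king_adjacent := sq.any (fun q => PySem.Str.isIn q stmt_lower)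
            let is_king_adjacent :=
              if PySem.Str.isIn "king on" stmt_lower || PySem.Str.isIn "protects the king" stmt_lower
              then true else is_king_adjacent
            if is_king_adjacent then (acc.1 ++ [stmt], acc.2) else (acc.1, acc.2 ++ [stmt]))
          = (fun (acc : List String × List String) stmt =>
              if pkaIsKingAdjacent sq stmt then (acc.1 ++ [stmt], acc.2)
              else (acc.1, acc.2 ++ [stmt])) := by
        funext acc stmt
        exact pka_if_bool (sq.any fun q => PySem.Str.isIn q (PySem.Str.lower stmt))
          (PySem.Str.isIn "king on" (PySem.Str.lower stmt))
          (PySem.Str.isIn "protects the king" (PySem.Str.lower stmt)) _ _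
      rw [hfun]
      exact pka_main (pkaIsKingAdjacent sq) statements
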